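-- pv_equiv track=rewrite | github.com/adamromayor/TwitterBot | tweet.py | word_counts_csv
-- ===== SOURCE A (Python) =====
-- def word_counts_csv(word_dic, min_count=0):
--     csv_text = ""
--     max_count = 0
--     for key in word_dic:
--         if word_dic[key] > max_count:
--             max_count = word_dic[key]
--
--     while (max_count > 0) and (max_count >= min_count):
--         for key in word_dic:
--             if word_dic[key] == max_count:
--                 csv_text += str(word_dic[key]) + "," + key + "\n"
--
--         max_count -= 1
--     return csv_text
-- ===== SOURCE B (Python) =====
-- def word_counts_csv(word_dic, min_count=0):
--     lo = max(min_count, 1)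
--     buckets = {}
--     for key, count in word_dic.items():
--         if count >= lo:
--             buckets.setdefault(count, []).append(str(count) + "," + key + "\n")
--     return "".join(line for c in sorted(buckets, reverse=True) for line in buckets[c])
-- ===== Notes on version B (the rewrite author's own statement) =====
-- stated objective: faster
-- what changed: A rescans the whole dict once for every integer value from max(counts) down to max(min_count,1); B makes one pass grouping lines into count-keyed buckets and then sorts only the distinct counts in descending order, joining the buckets.
import Mathlib
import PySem

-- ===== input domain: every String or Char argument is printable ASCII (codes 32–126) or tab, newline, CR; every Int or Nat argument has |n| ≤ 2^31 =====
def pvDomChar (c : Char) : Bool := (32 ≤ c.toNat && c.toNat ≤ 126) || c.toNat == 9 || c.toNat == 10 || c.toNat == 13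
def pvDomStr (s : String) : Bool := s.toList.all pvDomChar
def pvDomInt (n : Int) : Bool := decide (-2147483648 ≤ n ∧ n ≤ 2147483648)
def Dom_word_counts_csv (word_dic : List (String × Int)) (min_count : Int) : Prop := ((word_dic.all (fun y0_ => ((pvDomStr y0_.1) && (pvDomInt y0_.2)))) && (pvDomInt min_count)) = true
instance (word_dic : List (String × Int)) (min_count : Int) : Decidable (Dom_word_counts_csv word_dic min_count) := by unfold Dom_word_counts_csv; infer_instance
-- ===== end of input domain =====

-- B replaces A's count-down scan (one full pass over the dict for every integer from max(counts)
-- down to max(min_count,1)) by a single grouping pass into count-buckets plus a descending sort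
-- of the distinct counts; objective: faster.

-- ===== PORT A =====
-- A's while loop: condition 'max_count > 0 and max_count >= min_count'; the body appends one
-- CSV line per key whose count equals max_count, then decrements max_count.
def pvALoop (d : PySem.Dict String Int) (min_count : Int) (max_count : Int) (csv_text : String) : String :=
  if max_count > 0 ∧ max_count ≥ min_count then
    pvALoop d min_count (max_count - 1)
      (d.keys.foldl (fun s key =>
        if d.getD key 0 = max_count then s ++ PySem.Int.toStr (d.getD key 0) ++ "," ++ key ++ "\n" else s) csv_text)
  else csv_text
termination_by max_count.toNat
decreasing_by omega

def word_counts_csv (word_dic : List (String × Int)) (min_count : Int) : String :=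
  let d := PySem.Dict.ofList word_dic
  let max_count := d.keys.foldl (fun m key => if d.getD key 0 > m then d.getD key 0 else m) 0
  pvALoop d min_count max_count ""

-- ===== PORT B =====
def word_counts_csv_alt (word_dic : List (String × Int)) (min_count : Int) : String :=
  let d := PySem.Dict.ofList word_dic
  let lo := max min_count 1
  let buckets := d.items.foldl
    (fun b kv => if kv.2 ≥ lo then
        b.modify kv.2 [] (fun l => l ++ [PySem.Int.toStr kv.2 ++ "," ++ kv.1 ++ "\n"])
      else b)
    PySem.Dict.empty
  PySem.Str.join "" ((PySem.List.sorted buckets.keys (fun c => c) true).flatMap (fun c => buckets.getD c []))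

-- ===== PRECONDITION & SPEC =====
def Spec_word_counts_csv (word_dic : List (String × Int)) (min_count : Int) (out : String) : Prop := out = word_counts_csv_alt word_dic min_count
instance (word_dic : List (String × Int)) (min_count : Int) (out : String) : Decidable (Spec_word_counts_csv word_dic min_count out) := by unfold Spec_word_counts_csv; infer_instance

-- ===== CLAIM (what is proved, stated in full; the proofs are below) =====
def Claim_equal_word_counts_csv : Prop := ∀ (word_dic : List (String × Int)) (min_count : Int), Dom_word_counts_csv word_dic min_count → Spec_word_counts_csv word_dic min_count (word_counts_csv word_dic min_count)

-- ===== LEMMAS AND PROOFS =====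

-- the integer list max_count, max_count-1, …, lo traversed by A's while loop
def pvDown (hi lo : Int) : List Int := (List.range (hi + 1 - lo).toNat).map (fun i : Nat => hi - (i : Int))

-- one CSV line per (key, count) pair
def pvLine (kv : String × Int) : String := PySem.Int.toStr kv.2 ++ "," ++ kv.1 ++ "\n"

-- all lines whose count is c, in dict order
def pvG (ps : List (String × Int)) (c : Int) : List String :=
  (ps.filter (fun kv => decide (kv.2 = c))).map pvLine

-- B's grouping loop, on an arbitrary item list
def pvBuckets (ps : List (String × Int)) (lo : Int) : PySem.Dict Int (List String) :=
  ps.foldl (fun b kv => if kv.2 ≥ lo then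
      b.modify kv.2 [] (fun l => l ++ [PySem.Int.toStr kv.2 ++ "," ++ kv.1 ++ "\n"])
    else b) PySem.Dict.empty

theorem pvInter_nil (xs : List (List Char)) : List.intercalate [] xs = xs.flatten := by
  induction xs with
  | nil => rfl
  | cons a t ih => cases t <;> simp_all [List.intercalate, List.intersperse]

theorem pvJoin_cons (a : String) (l : List String) :
    PySem.Str.join "" (a :: l) = a ++ PySem.Str.join "" l := by
  apply String.toList_inj.mp
  simp [PySem.Str.toList_join, PySem.Chars.join, pvInter_nil]

theorem pvJoin_append (l₁ l₂ : List String) :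
    PySem.Str.join "" (l₁ ++ l₂) = PySem.Str.join "" l₁ ++ PySem.Str.join "" l₂ := by
  induction l₁ with
  | nil => simp [show PySem.Str.join "" [] = "" from rfl, String.empty_append]
  | cons a t ih => simp [pvJoin_cons, ih, String.append_assoc]

theorem pvJoin_flatMap {α : Type} (l : List α) (g : α → List String) :
    PySem.Str.join "" (l.flatMap g) = PySem.Str.join "" (l.map (fun c => PySem.Str.join "" (g c))) := by
  induction l with
  | nil => rfl
  | cons a t ih => simp [pvJoin_cons, pvJoin_append, ih]

theorem pvJoin_filter {α : Type} (l : List α) (p : α → Bool) (f : α → String)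
    (h : ∀ c ∈ l, p c = false → f c = "") :
    PySem.Str.join "" (l.map f) = PySem.Str.join "" ((l.filter p).map f) := by
  induction l with
  | nil => rfl
  | cons a t ih =>
      have ih' := ih (fun c hc => h c (List.mem_cons_of_mem _ hc))
      by_cases hp : p a
      · simp [hp, pvJoin_cons, ih']
      · simp only [Bool.not_eq_true] at hp
        simp [hp, pvJoin_cons, h a (List.mem_cons_self) hp, ih', String.empty_append]

theorem pvStrFoldl {α : Type} (l : List α) (p : α → Bool) (f : α → String) (s : String) :
    l.foldl (fun s x => if p x then s ++ f x else s) s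
    = s ++ PySem.Str.join "" ((l.filter p).map f) := by
  induction l generalizing s with
  | nil => simp [show PySem.Str.join "" [] = "" from rfl, String.append_empty]
  | cons a t ih =>
      by_cases hp : p a
      · simp [hp, ih, pvJoin_cons, String.append_assoc]
      · simp only [Bool.not_eq_true] at hp
        simp [hp, ih]

theorem pvDown_nil (hi lo : Int) (h : hi < lo) : pvDown hi lo = [] := by
  have : (hi + 1 - lo).toNat = 0 := by omega
  simp [pvDown, this]

theorem pvDown_cons (hi lo : Int) (h : lo ≤ hi) : pvDown hi lo = hi :: pvDown (hi - 1) lo := by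
  unfold pvDown
  have h1 : (hi + 1 - lo).toNat = (hi - 1 + 1 - lo).toNat + 1 := by omega
  rw [h1, List.range_succ_eq_map, List.map_cons, List.map_map]
  congr 1
  · norm_num
  · apply List.map_congr_left; intro i hi2; simp [Function.comp]; ring

theorem pvDown_mem (hi lo c : Int) : c ∈ pvDown hi lo ↔ lo ≤ c ∧ c ≤ hi := by
  simp only [pvDown, List.mem_map, List.mem_range]
  constructor
  · rintro ⟨i, hi', rfl⟩; omega
  · rintro ⟨h1, h2⟩; exact ⟨(hi - c).toNat, by omega, by omega⟩

theorem pvDown_pairwise (hi lo : Int) : (pvDown hi lo).Pairwise (fun a b => b < a) := by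
  refine List.Pairwise.map _ ?_ List.pairwise_lt_range
  intro a b hab; omega

-- the inner for-loop of A appends exactly the lines whose count is c
theorem pvInner (d : PySem.Dict String Int) (hn : d.keys.Nodup) (c : Int) (s : String) :
    d.keys.foldl (fun s key =>
      if d.getD key 0 = c then s ++ PySem.Int.toStr (d.getD key 0) ++ "," ++ key ++ "\n" else s) s
    = s ++ PySem.Str.join "" (pvG d.items c) := by
  have hkeys : d.keys = d.items.map (fun kv => kv.1) := by simp [PySem.Dict.keys]
  rw [hkeys, List.foldl_map]
  have hc := PySem.List.foldl_congr_mem d.items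
    (fun x (y : String × Int) => if d.getD y.1 0 = c then x ++ PySem.Int.toStr (d.getD y.1 0) ++ "," ++ y.1 ++ "\n" else x)
    (fun s kv => if (decide (kv.2 = c) : Bool) then s ++ pvLine kv else s) s ?_
  · rw [hc, pvStrFoldl]; rfl
  · intro acc kv hkv
    have hg : d.getD kv.1 0 = kv.2 := PySem.Dict.getD_of_mem_items d (by exact hkv) hn 0
    by_cases h : kv.2 = c
    · simp [hg, h, pvLine, String.append_assoc]
    · simp [hg, h]

-- A's first loop is the running max of the values
theorem pvMax_eq (d : PySem.Dict String Int) (hn : d.keys.Nodup) :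
    d.keys.foldl (fun m key => if d.getD key 0 > m then d.getD key 0 else m) 0
    = d.items.foldl (fun m kv => max m kv.2) 0 := by
  have hkeys : d.keys = d.items.map (fun kv => kv.1) := by simp [PySem.Dict.keys]
  rw [hkeys, List.foldl_map]
  apply PySem.List.foldl_congr_mem
  intro acc kv hkv
  have hg : d.getD kv.1 0 = kv.2 := PySem.Dict.getD_of_mem_items d (by exact hkv) hn 0
  rw [hg]
  by_cases h : kv.2 > acc
  · simp [h, max_eq_right (le_of_lt h)]
  · simp [h, max_eq_left (not_lt.mp h)]

-- A's while loop concatenates the count-c lines for c = max_count, max_count-1, …, max min_count 1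
theorem pvALoop_eq (d : PySem.Dict String Int) (hn : d.keys.Nodup) (mc : Int) (c : Int) (s : String) :
    pvALoop d mc c s
    = s ++ PySem.Str.join "" ((pvDown c (max mc 1)).map (fun c => PySem.Str.join "" (pvG d.items c))) := by
  fun_induction pvALoop d mc c s with
  | case1 mcount csv hcond ih =>
      simp only [dite_eq_ite] at ih
      rw [ih, pvInner d hn, pvDown_cons mcount (max mc 1) (max_le hcond.2 hcond.1),
        List.map_cons, pvJoin_cons, String.append_assoc]
  | case2 mcount csv hcond =>
      rw [pvDown_nil _ _ (by simp only [not_and, not_le] at hcond ⊢; omega)]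
      simp [show PySem.Str.join "" ([] : List String) = "" from rfl, String.append_empty]

theorem pvBuckets_eq (ps : List (String × Int)) (lo : Int) :
    pvBuckets ps lo = (ps.filter (fun kv => decide (kv.2 ≥ lo))).foldl
      (fun b kv => b.modify kv.2 [] (fun l => l ++ [pvLine kv])) PySem.Dict.empty := by
  unfold pvBuckets
  rw [PySem.List.foldl_ite_eq_foldl_filter]
  rfl

theorem pvBuckets_getD (ps : List (String × Int)) (lo c : Int) :
    (pvBuckets ps lo).getD c []
    = ((ps.filter (fun kv => decide (kv.2 ≥ lo))).filter (fun kv => kv.2 == c)).map pvLine := by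
  rw [pvBuckets_eq]
  have h := PySem.Dict.getD_foldl_modify_append
    ((ps.filter (fun kv => decide (kv.2 ≥ lo))).map (fun kv => (kv.2, pvLine kv)))
    PySem.Dict.empty c
  rw [List.foldl_map] at h
  simp only [List.filter_map, List.map_map] at h
  rw [h]
  simp [Function.comp]

theorem pvBuckets_keys (ps : List (String × Int)) (lo : Int) :
    (pvBuckets ps lo).keys
    = PySem.Set.ofList ((ps.filter (fun kv => decide (kv.2 ≥ lo))).map (fun kv => kv.2)) := by
  rw [pvBuckets_eq]
  have h := PySem.Dict.keys_foldl_modify_key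
    (ps.filter (fun kv => decide (kv.2 ≥ lo))) (fun kv : String × Int => kv.2) ([] : List String)
    (fun _ kv l => l ++ [pvLine kv]) PySem.Dict.empty
  rw [h]
  simp [PySem.Set.update_nil_left]

-- the sorted distinct counts of B are the non-empty positions of A's descending scan
theorem pvSorted_eq (ps : List (String × Int)) (lo : Int)
    (M : Int) (hM : M = ps.foldl (fun m kv => max m kv.2) 0)
    (K : List Int) (hK : K = PySem.Set.ofList ((ps.filter (fun kv => decide (kv.2 ≥ lo))).map (fun kv => kv.2))) :
    PySem.List.sorted K (fun c => c) true
    = (pvDown M lo).filter (fun c => decide (c ∈ K)) := by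
  have hmemK : ∀ c, c ∈ K ↔ ∃ kv ∈ ps, kv.2 ≥ lo ∧ kv.2 = c := by
    intro c
    simp [hK, PySem.Set.mem_ofList, List.mem_filter, List.mem_map]
  apply PySem.List.sorted_rev_eq_of_perm_of_pairwise_gt
  · rw [List.perm_ext_iff_of_nodup
      (List.Nodup.filter _ (List.Pairwise.imp (fun {a b} (h : b < a) => ne_of_gt h) (pvDown_pairwise M lo)))
      (hK ▸ PySem.Set.nodup_ofList _)]
    intro c
    simp only [List.mem_filter, decide_eq_true_eq, pvDown_mem]
    constructor
    · exact fun h => h.2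
    · intro hc
      refine ⟨⟨?_, ?_⟩, hc⟩
      · obtain ⟨kv, _, hge, rfl⟩ := (hmemK c).mp hc; exact hge
      · obtain ⟨kv, hm, _, rfl⟩ := (hmemK c).mp hc
        exact hM ▸ (PySem.List.le_foldl_max_int ps (fun kv => kv.2) 0).2 kv hm
  · exact List.Pairwise.filter _ (pvDown_pairwise M lo)

-- ===== VERDICT (by name: the statement is the Claim_ definition above) =====
theorem word_counts_csv_spec : Claim_equal_word_counts_csv := by
  intro word_dic mc _
  unfold Spec_word_counts_csv
  set d := PySem.Dict.ofList word_dic with hd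
  have hn : d.keys.Nodup := PySem.Dict.nodup_keys_ofList word_dic
  set ps := d.items with hps
  set lo := max mc 1 with hlo
  set M := ps.foldl (fun m kv => max m kv.2) 0 with hM
  set K := PySem.Set.ofList ((ps.filter (fun kv => decide (kv.2 ≥ lo))).map (fun kv => kv.2)) with hK
  -- A's side
  have hA : word_counts_csv word_dic mc
      = PySem.Str.join "" ((pvDown M lo).map (fun c => PySem.Str.join "" (pvG ps c))) := by
    show pvALoop d mc (d.keys.foldl (fun m key => if d.getD key 0 > m then d.getD key 0 else m) 0) "" = _
    rw [pvMax_eq d hn, pvALoop_eq d hn, String.empty_append]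
  -- B's side
  have hB : word_counts_csv_alt word_dic mc
      = PySem.Str.join "" ((PySem.List.sorted (pvBuckets ps lo).keys (fun c => c) true).flatMap
          (fun c => (pvBuckets ps lo).getD c [])) := rfl
  rw [hA, hB, pvBuckets_keys, ← hK, pvSorted_eq ps lo M hM K hK, pvJoin_flatMap]
  rw [pvJoin_filter (pvDown M lo) (fun c => decide (c ∈ K)) (fun c => PySem.Str.join "" (pvG ps c)) ?empty]
  case empty =>
    intro c hcd hcK
    have hnotK : c ∉ K := by simpa using hcK
    have hclo : lo ≤ c := ((pvDown_mem M lo c).mp hcd).1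
    have hfil : ps.filter (fun kv => decide (kv.2 = c)) = [] := by
      rw [List.filter_eq_nil_iff]
      intro kv hkv hdec
      have heq : kv.2 = c := of_decide_eq_true hdec
      apply hnotK
      rw [hK]
      apply (PySem.Set.mem_ofList _ _).mpr
      exact List.mem_map.mpr ⟨kv, List.mem_filter.mpr ⟨hkv, decide_eq_true (by omega)⟩, heq⟩
    unfold pvG
    simp only [hfil]
    rfl
  apply congrArg
  apply List.map_congr_left
  intro c hc
  apply congrArg
  rw [pvBuckets_getD]
  have hcK : c ∈ K := by
    simp only [List.mem_filter, decide_eq_true_eq] at hc; exact hc.2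
  have hclo : lo ≤ c := ((pvDown_mem M lo c).mp (List.mem_filter.mp hc).1).1
  rw [List.filter_filter]
  unfold pvG
  apply congrArg
  apply List.filter_congr
  intro kv hkv
  by_cases h : kv.2 = c
  · simp [h, decide_eq_true hclo]
  · simp [h]
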